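-- pv_equiv track=rewrite | github.com/endomorphosis/ipfs_datasets_py | ipfs_datasets_py/optimizers/graphrag/streaming_extractor.py | _chunk_by_paragraph
-- ===== SOURCE A (Python) =====
-- from typing import Any, Callable, Iterator, List, Optional
--
-- def _chunk_by_paragraph(text: str) -> List[tuple]:
--     """Chunk text by paragraphs (double newlines)."""
--     chunks = []
--     paragraphs = text.split('\n\n')
--     pos = 0
--
--     for para in paragraphs:
--         start = pos
--         end = pos + len(para) + 2  # Include newlines
--         chunks.append((start, min(end, len(text))))
--         pos = end
--
--     return chunks if chunks else [(0, len(text))]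
-- ===== SOURCE B (Python) =====
-- def _chunk_by_paragraph(text: str):
--     """Chunk text by paragraphs (double newlines) — offset scan, no substring list."""
--     n = len(text)
--     chunks = []
--     pos = 0
--     while True:
--         i = text.find('\n\n', pos)
--         if i == -1:
--             chunks.append((pos, n))
--             return chunks
--         chunks.append((pos, i + 2))
--         pos = i + 2
-- ===== Notes on version B (the rewrite author's own statement) =====
-- stated objective: alternative
-- what changed: B replaces split('\n\n') plus a fold over the substring list by a single find-based offset scan that never materializes any substring, maintaining only integer positions.
import Mathlib
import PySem

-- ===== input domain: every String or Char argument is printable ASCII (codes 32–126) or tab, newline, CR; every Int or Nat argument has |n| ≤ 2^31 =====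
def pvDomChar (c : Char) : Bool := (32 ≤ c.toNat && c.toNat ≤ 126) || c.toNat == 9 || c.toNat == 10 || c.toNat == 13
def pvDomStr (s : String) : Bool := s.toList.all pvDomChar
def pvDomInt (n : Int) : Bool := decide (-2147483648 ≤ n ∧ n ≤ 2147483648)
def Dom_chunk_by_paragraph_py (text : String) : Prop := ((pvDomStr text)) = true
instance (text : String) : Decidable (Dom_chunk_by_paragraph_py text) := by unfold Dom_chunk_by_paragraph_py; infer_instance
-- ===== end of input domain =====

-- B replaces split('\n\n') + a fold over the substring list by a find-based offset scan; return values proved equal, no speed claim.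

-- the separator '\n\n', shared by both ports
def pvNN : List Char := ['\n', '\n']

-- ===== PORT A =====
-- literal port of A: split the text on '\n\n', then fold over the paragraph list
-- accumulating (start, min(end, len(text))) with pos advanced by len(para)+2
def chunk_by_paragraph_py (text : String) : List (Int × Int) :=
  let s := text.toList
  let paragraphs := PySem.Chars.splitOn s pvNN
  let res := paragraphs.foldl
    (fun (st : List (Int × Int) × Int) para =>
      (st.1 ++ [(st.2, min (st.2 + (para.length : Int) + 2) (s.length : Int))],
       st.2 + (para.length : Int) + 2))
    ([], 0)
  if res.1 = [] then [(0, (s.length : Int))] else res.1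

-- ===== PORT B =====
-- termination fact for B's scan: a successful find lands at index ≥ pos and leaves room for the 2-char separator
theorem pvFindFrom_bounds (cs : List Char) (pos : Nat)
    (h : PySem.Chars.findFrom cs pvNN (pos : Int) none ≠ -1) :
    pos ≤ (PySem.Chars.findFrom cs pvNN (pos : Int) none).toNat ∧
    (PySem.Chars.findFrom cs pvNN (pos : Int) none).toNat + 2 ≤ cs.length := by
  by_cases hle : pos ≤ cs.length
  · rw [PySem.Chars.findFrom_natCast cs pvNN pos hle] at h ⊢
    split at h
    · exact absurd rfl h
    · rename_i hf
      have hnn : (0:Int) ≤ PySem.Chars.find (cs.drop pos) pvNN := by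
        have := PySem.Chars.neg_one_le_find (cs.drop pos) pvNN
        omega
      have hpre := (PySem.Chars.find_spec (s := cs.drop pos) (sub := pvNN) hnn).1
      have hlen := hpre.length_le
      have h2 : pvNN.length = 2 := rfl
      rw [h2, List.length_drop, List.length_drop] at hlen
      simp only [if_neg hf]
      omega
  · exfalso
    apply h
    simp only [PySem.Chars.findFrom]
    have h1 : ¬ ((cs.length : Int) < (pos : Int)) = False := by simp; omega
    rw [if_pos (by exact_mod_cast Nat.lt_of_not_le hle)]

-- literal port of B: scan with text.find('\n\n', pos), keeping only integer offsets
def chunkGo (cs : List Char) (pos : Nat) : List (Int × Int) :=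
  let i := PySem.Chars.findFrom cs pvNN (pos : Int) none
  if h : i = -1 then [((pos : Int), (cs.length : Int))]
  else ((pos : Int), i + 2) :: chunkGo cs (i.toNat + 2)
termination_by cs.length + 1 - pos
decreasing_by
  have := pvFindFrom_bounds cs pos h
  omega

def chunk_by_paragraph_py_alt (text : String) : List (Int × Int) :=
  chunkGo text.toList 0

-- ===== PRECONDITION & SPEC =====
def Spec_chunk_by_paragraph_py (text : String) (out : List (Int × Int)) : Prop := out = chunk_by_paragraph_py_alt text
instance (text : String) (out : List (Int × Int)) : Decidable (Spec_chunk_by_paragraph_py text out) := by unfold Spec_chunk_by_paragraph_py; infer_instance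

-- ===== CLAIM (what is proved, stated in full; the proofs are below) =====
def Claim_equal_chunk_by_paragraph_py : Prop := ∀ (text : String), Dom_chunk_by_paragraph_py text → Spec_chunk_by_paragraph_py text (chunk_by_paragraph_py text)

-- ===== LEMMAS AND PROOFS =====

def splitRef : List Char → List (List Char)
  | [] => [[]]
  | [c] => [[c]]
  | c :: d :: cs =>
    if c = '\n' ∧ d = '\n' then [] :: splitRef cs
    else
      match splitRef (d :: cs) with
      | [] => [[c]]
      | p :: ps => (c :: p) :: ps
def chunksRef (n : Int) (pos : Int) : List (List Char) → List (Int × Int)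
  | [] => []
  | p :: ps => (pos, min (pos + (p.length : Int) + 2) n) :: chunksRef n (pos + (p.length : Int) + 2) ps

theorem splitRef_ne_nil (l : List Char) : splitRef l ≠ [] := by
  match l with
  | [] => simp [splitRef]
  | [c] => simp [splitRef]
  | c :: d :: cs =>
    simp only [splitRef]
    split
    · simp
    · split <;> simp

theorem foldA (n : Int) (ps : List (List Char)) (acc : List (Int × Int)) (pos : Int) :
    (ps.foldl (fun (st : List (Int × Int) × Int) para =>
      (st.1 ++ [(st.2, min (st.2 + (para.length : Int) + 2) n)],
       st.2 + (para.length : Int) + 2)) (acc, pos)).1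
    = acc ++ chunksRef n pos ps := by
  induction ps generalizing acc pos with
  | nil => simp [chunksRef]
  | cons p ps ih => simp [List.foldl_cons, chunksRef, ih]

theorem splitRef_no (l : List Char) (h : ¬ pvNN <:+: l) : splitRef l = [l] := by
  match l with
  | [] => simp [splitRef]
  | [c] => simp [splitRef]
  | c :: d :: cs =>
    simp only [splitRef]
    rw [if_neg, splitRef_no (d :: cs)]
    · intro hinf
      exact h (List.infix_cons hinf)
    · rintro ⟨rfl, rfl⟩
      exact h ⟨[], cs, rfl⟩

theorem splitRef_yes (r : Nat) (l : List Char)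
    (h1 : pvNN <+: l.drop r) (h2 : ∀ i < r, ¬ pvNN <+: l.drop i) :
    splitRef l = l.take r :: splitRef (l.drop (r + 2)) := by
  induction r generalizing l with
  | zero =>
    obtain ⟨t, ht⟩ := h1
    simp only [List.drop_zero] at ht
    subst ht
    simp [splitRef, pvNN]
  | succ r ih =>
    match l with
    | [] => simp [pvNN] at h1
    | [c] =>
      have := h1.length_le
      simp [pvNN] at this
    | c :: d :: cs =>
      have h0 : ¬ (c = '\n' ∧ d = '\n') := by
        rintro ⟨rfl, rfl⟩
        exact h2 0 (Nat.succ_pos r) ⟨cs, rfl⟩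
      have ih' := ih (d :: cs) (by simpa using h1)
        (fun i hi => by simpa using h2 (i+1) (by omega))
      simp only [splitRef, if_neg h0, ih']
      rfl

def pvCons (pre : List Char) : List (List Char) → List (List Char)
  | [] => [pre]
  | p :: ps => (pre ++ p) :: ps

theorem go_acc (fuel : Nat) (l cur : List Char) (acc : List (List Char))
    (h : l.length < fuel) :
    PySem.Chars.splitOn.go pvNN fuel l cur acc = acc.reverse ++ pvCons cur.reverse (splitRef l) := by
  induction fuel generalizing l cur acc with
  | zero => omega
  | succ f ih =>
    match l with
    | [] =>
      simp [PySem.Chars.splitOn.go, splitRef, pvCons]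
    | c :: rest =>
      rw [PySem.Chars.splitOn.go]
      by_cases hp : pvNN.isPrefixOf (c :: rest) = true
      · rw [if_pos hp]
        have hpre : pvNN <+: (c :: rest) := List.isPrefixOf_iff_prefix.mp hp
        obtain ⟨t, ht⟩ := hpre
        have hc : c = '\n' := by injection ht with h1 _; exact h1.symm
        have hrest : rest = '\n' :: t := by
          injection ht with _ h2
          simpa using h2.symm
        subst hc hrest
        have hlen : t.length < f := by simp at h; omega
        have hdrop : List.drop pvNN.length ('\n' :: '\n' :: t) = t := rfl
        rw [hdrop, ih _ _ _ hlen]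
        have hsp : splitRef ('\n' :: '\n' :: t) = [] :: splitRef t := by simp [splitRef]
        rw [hsp]
        cases hs : splitRef t with
        | nil => exact absurd hs (splitRef_ne_nil t)
        | cons p ps => simp [pvCons]
      · rw [if_neg hp]
        have hlen : rest.length < f := by simp at h; omega
        rw [ih _ _ _ hlen]
        have hsp : splitRef (c :: rest) = pvCons [c] (splitRef rest) := by
          match rest with
          | [] => simp [splitRef, pvCons]
          | d :: cs =>
            have hnot : ¬ (c = '\n' ∧ d = '\n') := by
              rintro ⟨rfl, rfl⟩
              exact hp (List.isPrefixOf_iff_prefix.mpr ⟨cs, rfl⟩)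
            simp only [splitRef, if_neg hnot]
            cases hs : splitRef (d :: cs) with
            | nil => exact absurd hs (splitRef_ne_nil _)
            | cons p ps => simp [pvCons]
        rw [hsp]
        cases hs : splitRef rest with
        | nil => exact absurd hs (splitRef_ne_nil _)
        | cons p ps => simp [pvCons]

theorem splitOn_eq_splitRef (l : List Char) : PySem.Chars.splitOn l pvNN = splitRef l := by
  rw [PySem.Chars.splitOn, go_acc (l.length + 1) l [] [] (by omega)]
  cases hs : splitRef l with
  | nil => exact absurd hs (splitRef_ne_nil _)
  | cons p ps => simp [pvCons]

theorem bridge (cs : List Char) (pos : Nat) (hle : pos ≤ cs.length) :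
    chunkGo cs pos = chunksRef (cs.length : Int) (pos : Int) (splitRef (cs.drop pos)) := by
  rw [chunkGo]
  rw [PySem.Chars.findFrom_natCast cs pvNN pos hle]
  by_cases hf : PySem.Chars.find (cs.drop pos) pvNN = -1
  · rw [dif_pos (by rw [if_pos hf])]
    rw [splitRef_no _ ((PySem.Chars.find_eq_neg_one_iff _ _).mp hf)]
    simp only [chunksRef, List.length_drop]
    have e : min ((pos:Int) + ((cs.length - pos : Nat) : Int) + 2) ((cs.length : Nat) : Int) = ((cs.length : Nat) : Int) := by omega
    rw [e]
  · have hnn : (0:Int) ≤ PySem.Chars.find (cs.drop pos) pvNN := by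
      have := PySem.Chars.neg_one_le_find (cs.drop pos) pvNN
      omega
    rw [if_neg hf]
    rw [dif_neg (by omega)]
    obtain ⟨hpre, hmin⟩ := PySem.Chars.find_spec (s := cs.drop pos) (sub := pvNN) hnn
    set r : Nat := (PySem.Chars.find (cs.drop pos) pvNN).toNat with hr
    have hroom : r + 2 ≤ cs.length - pos := by
      have hlen := hpre.length_le
      have h2 : pvNN.length = 2 := rfl
      rw [h2, List.length_drop, List.length_drop] at hlen
      omega
    rw [splitRef_yes r (cs.drop pos) hpre hmin]
    have htn : ((pos : Int) + PySem.Chars.find (cs.drop pos) pvNN).toNat = pos + r := by omega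
    rw [htn]
    have hdd : (cs.drop pos).drop (r + 2) = cs.drop (pos + r + 2) := by
      rw [List.drop_drop]
      congr 1
    rw [hdd]
    have hrec := bridge cs (pos + r + 2) (by omega)
    rw [hrec]
    simp only [chunksRef, List.length_take, List.length_drop]
    have hfind : PySem.Chars.find (cs.drop pos) pvNN = (r : Int) := by omega
    rw [hfind]
    have hmin1 : min r (cs.length - pos) = r := by omega
    rw [hmin1]
    have e1 : min ((pos:Int) + (r:Int) + 2) ((cs.length : Nat) : Int) = (pos:Int) + (r:Int) + 2 := by omega
    rw [e1]
    norm_cast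
termination_by cs.length - pos
decreasing_by omega


-- ===== VERDICT (by name: the statement is the Claim_ definition above) =====
theorem chunk_by_paragraph_py_spec : Claim_equal_chunk_by_paragraph_py := by
  intro text _
  unfold Spec_chunk_by_paragraph_py chunk_by_paragraph_py chunk_by_paragraph_py_alt
  dsimp only
  rw [splitOn_eq_splitRef, foldA]
  rw [bridge text.toList 0 (by omega)]
  simp only [List.drop_zero, List.nil_append, Nat.cast_zero]
  rw [if_neg]
  cases hs : splitRef text.toList with
  | nil => exact absurd hs (splitRef_ne_nil _)
  | cons p ps => simp [chunksRef]
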